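-- pv_equiv track=rewrite | github.com/mayowaibi/leetcode-practice | 2614-maximum-count-of-positive-integer-and-negative-integer/maximum-count-of-positive-integer-and-negative-integer.py | maximumCount2
-- ===== SOURCE A (Python) =====
-- from typing import List
--
-- def maximumCount2(nums: List[int]) -> int:
--     pos = neg = 0
--
--     for n in nums:
--         if n > 0:
--             pos += 1
--         if n < 0:
--             neg += 1
--
--     return max(pos, neg)
-- ===== SOURCE B (Python) =====
-- from typing import List
--
-- def _boundary(s: List[int], strict: bool) -> int:
--     # first index i with not (s[i] < 0)  (strict) / not (s[i] <= 0)  (non-strict)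
--     lo, hi = 0, len(s)
--     while lo < hi:
--         mid = (lo + hi) // 2
--         if (s[mid] < 0) if strict else (s[mid] <= 0):
--             lo = mid + 1
--         else:
--             hi = mid
--     return lo
--
-- def maximumCount2(nums: List[int]) -> int:
--     s = sorted(nums)
--     neg = _boundary(s, True)
--     pos = len(s) - _boundary(s, False)
--     return max(pos, neg)
-- ===== Notes on version B (the rewrite author's own statement) =====
-- stated objective: alternative
-- what changed: Replaces the single linear counting pass with sorting the list once and binary-searching the two zero boundaries (bisect-style), reading both counts off the boundary indices; same result on every list, but a different algorithm (sort + binary search vs one counting pass), not faster since A is already linear.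
import Mathlib
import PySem

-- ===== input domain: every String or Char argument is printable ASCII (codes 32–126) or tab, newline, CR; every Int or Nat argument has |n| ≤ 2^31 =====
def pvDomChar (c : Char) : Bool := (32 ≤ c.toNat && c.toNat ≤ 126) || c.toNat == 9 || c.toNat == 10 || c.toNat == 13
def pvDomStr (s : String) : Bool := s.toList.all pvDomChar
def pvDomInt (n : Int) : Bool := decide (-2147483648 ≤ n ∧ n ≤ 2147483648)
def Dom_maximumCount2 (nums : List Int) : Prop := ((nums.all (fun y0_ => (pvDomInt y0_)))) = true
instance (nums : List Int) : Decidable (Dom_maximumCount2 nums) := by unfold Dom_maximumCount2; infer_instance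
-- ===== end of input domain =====

-- B sorts the list once and binary-searches the two zero boundaries instead of A's
-- linear counting pass: a different algorithm, same value on every list.

-- ===== PORT A =====
-- literal port of A's loop: one fold carrying (pos, neg), then max
def maximumCount2 (nums : List Int) : Int :=
  let pn := nums.foldl (fun (st : Int × Int) n =>
    let st1 := if n > 0 then (st.1 + 1, st.2) else st
    if n < 0 then (st1.1, st1.2 + 1) else st1) (0, 0)
  max pn.1 pn.2

-- ===== PORT B =====
-- port of Source B's _boundary: binary search for the first index whose element fails the
-- comparison against 0 (strict: s[mid] < 0; non-strict: s[mid] <= 0).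
-- s.getD mid 0: the index mid = (lo+hi)//2 is always in range when lo < hi ≤ len, so
-- the default is never read (exact for Source B's s[mid]).
def pvBoundary (s : List Int) (strict : Bool) (lo hi : Nat) : Nat :=
  if h : lo < hi then
    let mid := (lo + hi) / 2
    if (if strict then s.getD mid 0 < 0 else s.getD mid 0 ≤ 0) then
      pvBoundary s strict (mid + 1) hi
    else
      pvBoundary s strict lo mid
  else lo
termination_by hi - lo
decreasing_by all_goals omega

def maximumCount2_alt (nums : List Int) : Int :=
  let s := PySem.List.sorted nums (fun x => x) false
  let neg := pvBoundary s true 0 s.length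
  let pos := s.length - pvBoundary s false 0 s.length
  ((max pos neg : Nat) : Int)

-- ===== PRECONDITION & SPEC =====
def Spec_maximumCount2 (nums : List Int) (out : Int) : Prop := out = maximumCount2_alt nums
instance (nums : List Int) (out : Int) : Decidable (Spec_maximumCount2 nums out) := by unfold Spec_maximumCount2; infer_instance

-- ===== CLAIM (what is proved, stated in full; the proofs are below) =====
def Claim_equal_maximumCount2 : Prop := ∀ (nums : List Int), Dom_maximumCount2 nums → Spec_maximumCount2 nums (maximumCount2 nums)

-- ===== LEMMAS AND PROOFS =====

-- A's fold counts positives and negatives.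
theorem pvFoldA (nums : List Int) (p q : Int) :
    nums.foldl (fun (st : Int × Int) n =>
      let st1 := if n > 0 then (st.1 + 1, st.2) else st
      if n < 0 then (st1.1, st1.2 + 1) else st1) (p, q)
    = (p + nums.countP (fun n => 0 < n), q + nums.countP (fun n => n < 0)) := by
  induction nums generalizing p q with
  | nil => simp
  | cons a t ih =>
    simp only [List.foldl_cons, List.countP_cons]
    rcases lt_trichotomy a 0 with h | h | h
    · simp only [ih, gt_iff_lt, decide_eq_true_eq]
      simp [h, not_lt.mpr (le_of_lt h)]
      ring
    · subst h; simp [ih]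
    · simp [ih, h, not_lt.mpr (le_of_lt h)]
      ring

-- In a sorted list, a downward-closed predicate holds exactly on the first countP indices.
theorem pvSortedSplit (p : Int → Prop) [DecidablePred p]
    (hdc : ∀ x y : Int, y ≤ x → p x → p y)
    (s : List Int) (hs : s.Pairwise (· ≤ ·)) :
    ∀ i (hi : i < s.length), (p s[i] ↔ i < s.countP (fun x => decide (p x))) := by
  induction s with
  | nil => intro i hi; simp at hi
  | cons a t ih =>
    intro i hi
    have hpw := (List.pairwise_cons.mp hs)
    by_cases hpa : p a
    · have hcnt : (a :: t).countP (fun x => decide (p x))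
          = t.countP (fun x => decide (p x)) + 1 := by
        simp [hpa]
      cases i with
      | zero => simp [hcnt, hpa]
      | succ j =>
        have hj : j < t.length := by simpa using hi
        have hiff := ih hpw.2 j hj
        simp only [List.getElem_cons_succ, hcnt, Nat.succ_lt_succ_iff]
        exact hiff
    · have ht0 : t.countP (fun x => decide (p x)) = 0 := by
        rw [List.countP_eq_zero]
        intro x hx
        simp only [decide_eq_true_eq]
        exact fun hpx => hpa (hdc x a (hpw.1 x hx) hpx)
      have hcnt : (a :: t).countP (fun x => decide (p x)) = 0 := by
        simp [hpa, ht0]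
      cases i with
      | zero => simp [hcnt, hpa]
      | succ j =>
        have hj : j < t.length := by simpa using hi
        have hx : t[j] ∈ t := List.getElem_mem hj
        simp only [List.getElem_cons_succ, hcnt]
        constructor
        · intro hpx; exact absurd (hdc _ a (hpw.1 _ hx) hpx) hpa
        · omega

-- The binary search returns the boundary index c whenever lo ≤ c ≤ hi ≤ len and
-- the predicate holds exactly below c.
theorem pvBoundary_eq (s : List Int) (strict : Bool) (c : Nat)
    (hchar : ∀ i (hi : i < s.length),
      ((if strict then s[i] < 0 else s[i] ≤ 0) ↔ i < c)) :
    ∀ lo hi, lo ≤ c → c ≤ hi → hi ≤ s.length → pvBoundary s strict lo hi = c := by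
  intro lo hi
  induction lo, hi using pvBoundary.induct s strict with
  | case1 lo hi h mid hcond ih =>
    intro hlo hhi hlen
    have hmlt : mid < s.length := by omega
    have hsome : s[mid]? = some s[mid] := List.getElem?_eq_getElem hmlt
    have hm : mid < c := by
      refine (hchar mid hmlt).mp ?_
      cases strict <;> simpa [List.getD, hsome] using hcond
    have hcond' : (if strict = true then s.getD mid 0 < 0 else s.getD mid 0 ≤ 0) := by
      cases strict <;> simpa using hcond
    rw [pvBoundary]
    simp only [dif_pos h]
    rw [if_pos hcond']
    exact ih (by omega) hhi hlen
  | case2 lo hi h mid hcond ih =>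
    intro hlo hhi hlen
    have hmlt : mid < s.length := by omega
    have hsome : s[mid]? = some s[mid] := List.getElem?_eq_getElem hmlt
    have hm : c ≤ mid := by
      by_contra hlt
      have h2 := (hchar mid hmlt).mpr (by omega)
      cases strict <;> simp [List.getD, hsome] at hcond h2 <;> omega
    have hcond' : ¬ (if strict = true then s.getD mid 0 < 0 else s.getD mid 0 ≤ 0) := by
      cases strict <;> simpa using hcond
    rw [pvBoundary]
    simp only [dif_pos h]
    rw [if_neg hcond']
    exact ih hlo hm (by omega)
  | case3 lo hi h =>
    intro hlo hhi _
    rw [pvBoundary]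
    simp only [dif_neg h]
    omega

-- ===== VERDICT (by name: the statement is the Claim_ definition above) =====
theorem maximumCount2_spec : Claim_equal_maximumCount2 := by
  intro nums _
  unfold Spec_maximumCount2 maximumCount2 maximumCount2_alt
  set s := PySem.List.sorted nums (fun x => x) false with hs
  have hperm : s.Perm nums := PySem.List.sorted_perm nums (fun x => x) false
  have hpw : s.Pairwise (· ≤ ·) := by
    have := PySem.List.sorted_pairwise nums (fun x => x)
    simpa using this
  -- boundary values
  have hneg : pvBoundary s true 0 s.length = s.countP (fun x => decide (x < 0)) := by
    apply pvBoundary_eq s true _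
      (fun i hi => by
        simpa using pvSortedSplit (fun x => x < 0) (fun x y hyx hx => lt_of_le_of_lt hyx hx) s hpw i hi)
      0 s.length (Nat.zero_le _) List.countP_le_length le_rfl
  have hpos : pvBoundary s false 0 s.length = s.countP (fun x => decide (x ≤ 0)) := by
    apply pvBoundary_eq s false _
      (fun i hi => by
        simpa using pvSortedSplit (fun x => x ≤ 0) (fun x y hyx hx => le_trans hyx hx) s hpw i hi)
      0 s.length (Nat.zero_le _) List.countP_le_length le_rfl
  -- complement: count of positives = length - count of nonpositives
  have hsplit : s.countP (fun x => decide (0 < x)) + s.countP (fun x => decide (x ≤ 0)) = s.length := by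
    have hlen := List.length_eq_countP_add_countP (p := fun x => decide (0 < x)) (l := s)
    have hnot : s.countP (fun a => decide ¬(decide (0 < a)) = true)
        = s.countP (fun x => decide (x ≤ 0)) := by
      apply List.countP_congr
      intro x _
      simp [not_lt]
    omega
  have hA := pvFoldA nums 0 0
  rw [hA]
  have hcp : s.countP (fun x => decide (0 < x)) = nums.countP (fun x => decide (0 < x)) :=
    hperm.countP_eq _
  have hcn : s.countP (fun x => decide (x < 0)) = nums.countP (fun x => decide (x < 0)) :=
    hperm.countP_eq _
  simp only [hneg, hpos]
  have hle : s.countP (fun x => decide (x ≤ 0)) ≤ s.length := List.countP_le_length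
  have h1 : s.length - s.countP (fun x => decide (x ≤ 0)) = nums.countP (fun x => decide (0 < x)) := by
    omega
  rw [h1, hcn]
  push_cast
  simp [max_comm]
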